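-- pv_equiv track=rewrite | github.com/Kelojonjon/SigilEngine | ascii_screen.py | generate_wrapped_chart
-- ===== SOURCE A (Python) =====
-- def generate_wrapped_chart(origin_yx, string, width):
--     """
--     Generate coordinates for text placement, wrapping when reaching the given width.
--     Also wraps around with newline.
--     To disable automatic wrapping, set the width larger than the expected line length.
--     """
--     y, x = origin_yx
--     original_x = x
--     chart = []
--
--     for char in string:
--
--         if char == "\n":
--             y += 1
--             x = original_x
--             continue
--
--         chart.append((y, x))
--         x += 1
--         if (x - original_x) >= width:
--             x = original_x
--             y += 1
--
--     return chart
-- ===== SOURCE B (Python) =====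
-- def generate_wrapped_chart(origin_yx, string, width):
--     base, original_x = origin_yx
--     w = width if width >= 1 else 1  # width <= 0 wraps after every char, same as w == 1
--     chart = []
--     for seg in string.split("\n"):
--         n = len(seg)
--         for i in range(n):
--             chart.append((base + i // w, original_x + i % w))
--         base += n // w + 1
--     return chart
-- ===== Notes on version B (the rewrite author's own statement) =====
-- stated objective: alternative
-- what changed: A walks the string character by character maintaining a cursor (y, x) that it increments and resets; B splits the string on newlines and computes each character's coordinate in closed form as (base + i // w, x0 + i % w) from its index i within the line, advancing the base row by len(line) // w + 1 per line (w = width, or 1 when width <= 0, which wraps after every character exactly as A does).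
import Mathlib
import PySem

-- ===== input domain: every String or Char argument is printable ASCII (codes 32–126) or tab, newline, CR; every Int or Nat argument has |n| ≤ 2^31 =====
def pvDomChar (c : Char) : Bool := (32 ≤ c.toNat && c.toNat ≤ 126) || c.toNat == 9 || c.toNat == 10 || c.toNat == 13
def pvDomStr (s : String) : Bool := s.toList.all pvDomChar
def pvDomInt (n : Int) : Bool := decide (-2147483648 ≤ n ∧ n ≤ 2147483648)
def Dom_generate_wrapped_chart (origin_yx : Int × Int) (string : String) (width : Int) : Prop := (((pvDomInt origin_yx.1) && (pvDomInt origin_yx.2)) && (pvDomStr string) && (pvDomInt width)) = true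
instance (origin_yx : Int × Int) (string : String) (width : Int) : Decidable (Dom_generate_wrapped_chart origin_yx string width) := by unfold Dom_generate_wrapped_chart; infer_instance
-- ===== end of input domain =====

-- B replaces A's per-character cursor loop by split-on-newline with divmod coordinate
-- arithmetic on the index within each line (objective: alternative, same cost).

-- ===== PORT A =====
-- A's loop body: state (y, x, chart)
def gwcStepA (original_x width : Int) (st : Int × Int × List (Int × Int)) (char : Char) : Int × Int × List (Int × Int) :=
  if char = '\n' then (st.1 + 1, original_x, st.2.2)
  else
    let chart := st.2.2 ++ [(st.1, st.2.1)]
    let x := st.2.1 + 1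
    if x - original_x ≥ width then (st.1 + 1, original_x, chart) else (st.1, x, chart)

def generate_wrapped_chart (origin_yx : Int × Int) (string : String) (width : Int) : List (Int × Int) :=
  (string.toList.foldl (gwcStepA origin_yx.2 width) (origin_yx.1, origin_yx.2, [])).2.2

-- ===== PORT B =====
-- Source B's inner loop: 'for i in range(n): chart.append((base + i // w, original_x + i % w))'
def gwcSeg (w original_x base : Int) (seg : List Char) (chart : List (Int × Int)) : List (Int × Int) :=
  (PySem.List.pyRange 0 (seg.length : Int) 1).foldl
    (fun ch i => ch ++ [(base + PySem.Int.floordiv i w, original_x + PySem.Int.mod i w)]) chart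

-- Source B's outer loop body: state (base, chart)
def gwcStepB (w original_x : Int) (st : Int × List (Int × Int)) (seg : List Char) : Int × List (Int × Int) :=
  (st.1 + PySem.Int.floordiv (seg.length : Int) w + 1, gwcSeg w original_x st.1 seg st.2)

def generate_wrapped_chart_alt (origin_yx : Int × Int) (string : String) (width : Int) : List (Int × Int) :=
  let w : Int := if width ≥ 1 then width else 1
  ((PySem.Chars.splitOn string.toList ['\n']).foldl (gwcStepB w origin_yx.2) (origin_yx.1, [])).2

-- ===== PRECONDITION & SPEC =====
def Spec_generate_wrapped_chart (origin_yx : Int × Int) (string : String) (width : Int) (out : List (Int × Int)) : Prop := out = generate_wrapped_chart_alt origin_yx string width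
instance (origin_yx : Int × Int) (string : String) (width : Int) (out : List (Int × Int)) : Decidable (Spec_generate_wrapped_chart origin_yx string width out) := by unfold Spec_generate_wrapped_chart; infer_instance

-- ===== CLAIM (what is proved, stated in full; the proofs are below) =====
def Claim_equal_generate_wrapped_chart : Prop := ∀ (origin_yx : Int × Int) (string : String) (width : Int), Dom_generate_wrapped_chart origin_yx string width → Spec_generate_wrapped_chart origin_yx string width (generate_wrapped_chart origin_yx string width)

-- ===== LEMMAS AND PROOFS =====

-- structural model of str.split("\n"): pre = characters of the current line already consumed
def gwcSplit (pre : List Char) : List Char → List (List Char)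
  | [] => [pre]
  | c :: t => if c = '\n' then pre :: gwcSplit [] t else gwcSplit (pre ++ [c]) t

-- line lengths only (the coordinates depend on nothing else): k = chars already on the current line
def gwcLens (k : Nat) : List Char → List Nat
  | [] => [k]
  | c :: t => if c = '\n' then k :: gwcLens 0 t else gwcLens (k + 1) t

-- the coordinates B emits for one line of length n starting at row `base`
def gwcEmit (wn : Nat) (ox base : Int) (n : Nat) : List (Int × Int) :=
  (List.range n).map (fun i => (base + ((i / wn : Nat) : Int), ox + ((i % wn : Nat) : Int)))

-- B's outer step, on line lengths
def gwcStepN (wn : Nat) (ox : Int) (st : Int × List (Int × Int)) (n : Nat) : Int × List (Int × Int) :=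
  (st.1 + ((n / wn : Nat) : Int) + 1, st.2 ++ gwcEmit wn ox st.1 n)

lemma gwcSplitOn_go_spec (l : List Char) : ∀ (fuel : Nat), l.length < fuel →
    ∀ (cur : List Char) (acc : List (List Char)),
    PySem.Chars.splitOn.go ['\n'] fuel l cur acc = acc.reverse ++ gwcSplit cur.reverse l := by
  induction l with
  | nil =>
    intro fuel hf cur acc
    match fuel, hf with
    | fuel + 1, _ => simp [PySem.Chars.splitOn.go, gwcSplit]
  | cons c t ih =>
    intro fuel hf cur acc
    match fuel, hf with
    | fuel + 1, hf =>
      by_cases h : c = '\n'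
      · subst h
        simp only [PySem.Chars.splitOn.go, List.isPrefixOf, beq_self_eq_true, Bool.true_and]
        simp [ih fuel (by simpa using hf) [] (cur.reverse :: acc), gwcSplit]
      · have hp : (['\n'].isPrefixOf (c :: t)) = false := by
          simp [List.isPrefixOf]; exact fun hc => absurd hc.symm h
        simp only [PySem.Chars.splitOn.go, hp]
        rw [ih fuel (by simpa using hf) (c :: cur) acc]
        simp [gwcSplit, h]

lemma gwcSplitOn_eq (l : List Char) : PySem.Chars.splitOn l ['\n'] = gwcSplit [] l := by
  have := gwcSplitOn_go_spec l (l.length + 1) (by omega) [] []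
  simpa [PySem.Chars.splitOn] using this

lemma gwcSplit_lens (l : List Char) : ∀ (pre : List Char),
    (gwcSplit pre l).map List.length = gwcLens pre.length l := by
  induction l with
  | nil => intro pre; simp [gwcSplit, gwcLens]
  | cons c t ih =>
    intro pre
    by_cases h : c = '\n' <;> simp [gwcSplit, gwcLens, h, ih]

lemma gwcSeg_emit (wn : Nat) (ox base : Int) (seg : List Char) (ch : List (Int × Int)) :
    gwcSeg (wn : Int) ox base seg ch = ch ++ gwcEmit wn ox base seg.length := by
  unfold gwcSeg gwcEmit
  rw [PySem.List.pyRange_zero_nat]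
  rw [List.foldl_map, PySem.List.foldl_append_singleton_eq_map]
  congr 1
  apply List.map_congr_left
  intro i _
  simp [PySem.Int.floordiv_natCast, PySem.Int.mod_natCast]

lemma gwcStepB_eq_stepN (wn : Nat) (ox : Int) (st : Int × List (Int × Int)) (seg : List Char) :
    gwcStepB (wn : Int) ox st seg = gwcStepN wn ox st seg.length := by
  unfold gwcStepB gwcStepN
  rw [gwcSeg_emit]
  simp [PySem.Int.floordiv_natCast]

-- division bookkeeping for one more character on the current line
lemma gwcDivStep (wn k : Nat) (hw : 1 ≤ wn) :
    (if k % wn + 1 = wn then ((k + 1) / wn = k / wn + 1 ∧ (k + 1) % wn = 0)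
     else ((k + 1) / wn = k / wn ∧ (k + 1) % wn = k % wn + 1)) := by
  have hd := Nat.div_add_mod k wn
  have hm : k % wn < wn := Nat.mod_lt _ hw
  have hk1 : k + 1 = (k % wn + 1) + wn * (k / wn) := by omega
  split
  · next h =>
    refine ⟨?_, ?_⟩
    · rw [hk1, h, Nat.add_mul_div_left _ _ (by omega), Nat.div_self (by omega)]; ring
    · rw [hk1, h, Nat.add_mul_mod_self_left, Nat.mod_self]
  · next h =>
    have hlt : k % wn + 1 < wn := by omega
    refine ⟨?_, ?_⟩
    · rw [hk1, Nat.add_mul_div_left _ _ (by omega), Nat.div_eq_of_lt hlt]; ring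
    · rw [hk1, Nat.add_mul_mod_self_left, Nat.mod_eq_of_lt hlt]

lemma gwcEmit_succ (wn : Nat) (ox base : Int) (k : Nat) :
    gwcEmit wn ox base (k + 1) = gwcEmit wn ox base k ++ [(base + ((k / wn : Nat) : Int), ox + ((k % wn : Nat) : Int))] := by
  simp [gwcEmit, List.range_succ]

lemma gwcStepA_char (wn : Nat) (hw : 1 ≤ wn) (width ox : Int)
    (hcond : (width ≤ 1 ∧ wn = 1) ∨ (1 ≤ width ∧ width = (wn : Int)))
    (k : Nat) (base : Int) (acc : List (Int × Int)) (c : Char) (h : ¬ c = '\n') :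
    gwcStepA ox width (base + ((k / wn : Nat) : Int), ox + ((k % wn : Nat) : Int), acc ++ gwcEmit wn ox base k) c
      = (base + (((k + 1) / wn : Nat) : Int), ox + (((k + 1) % wn : Nat) : Int), acc ++ gwcEmit wn ox base (k + 1)) := by
  have hdiv := gwcDivStep wn k hw
  have hm : k % wn < wn := Nat.mod_lt _ hw
  rw [gwcEmit_succ]
  unfold gwcStepA
  rw [if_neg h]
  simp only [List.append_assoc]
  split_ifs with hc
  · have hwrap : k % wn + 1 = wn := by
      rcases hcond with ⟨h1, h2⟩ | ⟨h1, h2⟩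
      · omega
      · subst h2
        have : ((k % wn : Nat) : Int) + 1 ≥ (wn : Int) := by omega
        exact_mod_cast by push_cast at this ⊢; omega
    rw [if_pos hwrap] at hdiv
    obtain ⟨hd1, hd2⟩ := hdiv
    rw [hd1, hd2]
    push_cast
    refine Prod.ext (by ring) (Prod.ext (by simp) rfl)
  · have hnw : ¬ (k % wn + 1 = wn) := by
      rcases hcond with ⟨h1, h2⟩ | ⟨h1, h2⟩
      · exfalso; apply hc; push_cast; omega
      · subst h2; intro he; apply hc; push_cast; omega
    rw [if_neg hnw] at hdiv
    obtain ⟨hd1, hd2⟩ := hdiv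
    rw [hd1, hd2]
    push_cast
    refine Prod.ext (by ring) (Prod.ext (by ring) rfl)

lemma gwcMain (wn : Nat) (hw : 1 ≤ wn) (width ox : Int)
    (hcond : (width ≤ 1 ∧ wn = 1) ∨ (1 ≤ width ∧ width = (wn : Int))) :
    ∀ (l : List Char) (k : Nat) (base : Int) (acc0 : List (Int × Int)),
    (l.foldl (gwcStepA ox width) (base + ((k / wn : Nat) : Int), ox + ((k % wn : Nat) : Int), acc0 ++ gwcEmit wn ox base k)).2.2
      = ((gwcLens k l).foldl (gwcStepN wn ox) (base, acc0)).2 := by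
  intro l
  induction l with
  | nil => intro k base acc0; simp [gwcLens, gwcStepN]
  | cons c t ih =>
    intro k base acc0
    by_cases h : c = '\n'
    · subst h
      rw [List.foldl_cons]
      rw [show gwcStepA ox width (base + ((k / wn : Nat) : Int), ox + ((k % wn : Nat) : Int), acc0 ++ gwcEmit wn ox base k) '\n'
            = ((base + ((k / wn : Nat) : Int) + 1) + ((0 / wn : Nat) : Int), ox + ((0 % wn : Nat) : Int),
               (acc0 ++ gwcEmit wn ox base k) ++ gwcEmit wn ox (base + ((k / wn : Nat) : Int) + 1) 0) by
            simp [gwcStepA, gwcEmit, Nat.zero_div, Nat.zero_mod]]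
      rw [ih 0 (base + ((k / wn : Nat) : Int) + 1) (acc0 ++ gwcEmit wn ox base k)]
      simp [gwcLens, gwcStepN]
    · rw [List.foldl_cons, gwcStepA_char wn hw width ox hcond k base acc0 c h, ih (k + 1) base acc0]
      simp [gwcLens, h]

lemma gwcFoldB_eq (wn : Nat) (w ox : Int) (hwid : w = (wn : Int)) (segs : List (List Char)) (st : Int × List (Int × Int)) :
    segs.foldl (gwcStepB w ox) st = (segs.map List.length).foldl (gwcStepN wn ox) st := by
  subst hwid
  rw [List.foldl_map]
  have hf : gwcStepB ((wn : Nat) : Int) ox = fun st' seg => gwcStepN wn ox st' seg.length := by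
    funext st' seg; exact gwcStepB_eq_stepN wn ox st' seg
  rw [hf]

-- ===== VERDICT (by name: the statement is the Claim_ definition above) =====
theorem generate_wrapped_chart_spec : Claim_equal_generate_wrapped_chart := by
  intro origin_yx string width _
  unfold Spec_generate_wrapped_chart generate_wrapped_chart generate_wrapped_chart_alt
  obtain ⟨y0, ox⟩ := origin_yx
  simp only []
  by_cases hW : width ≥ 1
  · have hw1 : 1 ≤ width.toNat := by omega
    have hwid : width = ((width.toNat : Nat) : Int) := (Int.toNat_of_nonneg (by omega)).symm
    rw [if_pos hW, gwcSplitOn_eq, gwcFoldB_eq width.toNat width ox hwid, gwcSplit_lens]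
    have := gwcMain width.toNat hw1 width ox (Or.inr ⟨hW, hwid⟩) string.toList 0 y0 []
    simpa [gwcEmit] using this
  · rw [if_neg hW, gwcSplitOn_eq, gwcFoldB_eq 1 1 ox (by norm_num), gwcSplit_lens]
    have := gwcMain 1 le_rfl width ox (Or.inl ⟨by omega, rfl⟩) string.toList 0 y0 []
    simpa [gwcEmit] using this
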